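-- pv_equiv track=rewrite | github.com/valery-judah/leetcode-python | common/testgen.py | _example_for
-- ===== SOURCE A (Python) =====
-- def _example_for(py_t: str) -> str:
--     t = py_t.strip()
--     if t.startswith("list[") and t.endswith("]"):
--         inner = t[5:-1]
--         return f"[{_example_for(inner)}]"
--     if t.endswith("[]"):
--         inner = t[:-2]
--         return f"[{_example_for(inner)}]"
--     if "ListNode" in t:
--         return "ListNode(1, ListNode(2))"
--     if "TreeNode" in t:
--         return "TreeNode(1, TreeNode(2), TreeNode(3))"
--     if "UndirectedGraphNode" in t:
--         return "UndirectedGraphNode(1)"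
--     if "RandomListNode" in t:
--         return "RandomListNode(1)"
--     if "NestedInteger" in t:
--         return "NestedInteger(1)"
--     if t in ("int", "long"):
--         return "0"
--     if t in ("float", "double"):
--         return "0.0"
--     if t in ("bool",):
--         return "False"
--     if t in ("str", "character"):
--         return '"a"'
--     if t in ("None",):
--         return "None"
--     return "None"
-- ===== SOURCE B (Python) =====
-- _NODES = [
--     ("ListNode", "ListNode(1, ListNode(2))"),
--     ("TreeNode", "TreeNode(1, TreeNode(2), TreeNode(3))"),
--     ("UndirectedGraphNode", "UndirectedGraphNode(1)"),
--     ("RandomListNode", "RandomListNode(1)"),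
--     ("NestedInteger", "NestedInteger(1)"),
-- ]
--
-- _SCALARS = {
--     "int": "0", "long": "0",
--     "float": "0.0", "double": "0.0",
--     "bool": "False",
--     "str": '"a"', "character": '"a"',
--     "None": "None",
-- }
--
--
-- def _example_for(py_t: str) -> str:
--     t = py_t.strip()
--     depth = 0
--     while True:
--         if t.startswith("list[") and t.endswith("]"):
--             t = t[5:-1].strip()
--         elif t.endswith("[]"):
--             t = t[:-2].strip()
--         else:
--             break
--         depth += 1
--     base = None
--     for sub, ex in _NODES:
--         if sub in t:
--             base = ex
--             break
--     if base is None: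
--         base = _SCALARS.get(t, "None")
--     return "[" * depth + base + "]" * depth
-- ===== Notes on version B (the rewrite author's own statement) =====
-- stated objective: alternative
-- what changed: Replaced A's self-recursion on the inner type with an iterative peel loop that counts list-nesting depth and wraps once at the end, and replaced the if-chain base cases with a table scan (node substrings) plus a dict lookup (scalars).
import Mathlib
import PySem

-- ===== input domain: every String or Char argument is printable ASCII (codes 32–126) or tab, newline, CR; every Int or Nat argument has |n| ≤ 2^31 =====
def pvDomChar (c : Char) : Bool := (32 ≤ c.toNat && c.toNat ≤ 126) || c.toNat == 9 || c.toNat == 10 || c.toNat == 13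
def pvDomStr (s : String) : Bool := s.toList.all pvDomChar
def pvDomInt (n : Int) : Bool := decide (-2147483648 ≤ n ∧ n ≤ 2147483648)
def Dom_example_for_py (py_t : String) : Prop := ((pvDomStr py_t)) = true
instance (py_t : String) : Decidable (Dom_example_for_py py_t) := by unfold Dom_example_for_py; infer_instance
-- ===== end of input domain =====

-- B replaces A's recursion by a depth-counting peel loop plus a table-driven base lookup (objective: alternative decomposition).
-- ===== PORT A =====
-- helpers cited by the ports' decreasing_by
-- termination helpers
theorem pvStripLenLe (cs : List Char) : (PySem.Chars.strip cs).length ≤ cs.length := by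
  simp [PySem.Chars.strip, PySem.Chars.lstrip, PySem.Chars.rstrip]
  exact le_trans (List.length_dropWhile_le _ _) (by simpa using (List.length_dropWhile_le _ _))

theorem pvSliceFiveLt (t : List Char) (h : PySem.Chars.endswith t "]".toList = true) :
    (PySem.Chars.slice t (some 5) (some (-1))).length < t.length := by
  have h1 : 1 ≤ t.length := by
    have := (PySem.Chars.endswith_iff t "]".toList).mp h
    simpa using this.length_le
  have hne : t ≠ [] := by intro e; subst e; simp at h1
  rw [PySem.Chars.slice_eq_listSlice, PySem.List.length_slice]
  simp [PySem.List.clampIdx, hne]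
  omega

theorem pvSliceTwoLt (t : List Char) (h : PySem.Chars.endswith t "[]".toList = true) :
    (PySem.Chars.slice t none (some (-2))).length < t.length := by
  have h1 : 2 ≤ t.length := by
    have := (PySem.Chars.endswith_iff t "[]".toList).mp h
    simpa using this.length_le
  rw [PySem.Chars.slice_eq_listSlice, PySem.List.slice_to_neg_ofNat t 2 (by omega)]
  simp
  omega

def exAChars (cs : List Char) : List Char :=
  if h1 : (PySem.Chars.startswith (PySem.Chars.strip cs) "list[".toList && PySem.Chars.endswith (PySem.Chars.strip cs) "]".toList) = true then
    '[' :: exAChars (PySem.Chars.slice (PySem.Chars.strip cs) (some 5) (some (-1))) ++ [']']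
  else if h2 : PySem.Chars.endswith (PySem.Chars.strip cs) "[]".toList = true then
    '[' :: exAChars (PySem.Chars.slice (PySem.Chars.strip cs) none (some (-2))) ++ [']']
  else if PySem.Chars.isIn "ListNode".toList (PySem.Chars.strip cs) then "ListNode(1, ListNode(2))".toList
  else if PySem.Chars.isIn "TreeNode".toList (PySem.Chars.strip cs) then "TreeNode(1, TreeNode(2), TreeNode(3))".toList
  else if PySem.Chars.isIn "UndirectedGraphNode".toList (PySem.Chars.strip cs) then "UndirectedGraphNode(1)".toList
  else if PySem.Chars.isIn "RandomListNode".toList (PySem.Chars.strip cs) then "RandomListNode(1)".toList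
  else if PySem.Chars.isIn "NestedInteger".toList (PySem.Chars.strip cs) then "NestedInteger(1)".toList
  else if (PySem.Chars.strip cs) = "int".toList ∨ (PySem.Chars.strip cs) = "long".toList then "0".toList
  else if (PySem.Chars.strip cs) = "float".toList ∨ (PySem.Chars.strip cs) = "double".toList then "0.0".toList
  else if (PySem.Chars.strip cs) = "bool".toList then "False".toList
  else if (PySem.Chars.strip cs) = "str".toList ∨ (PySem.Chars.strip cs) = "character".toList then "\"a\"".toList
  else if (PySem.Chars.strip cs) = "None".toList then "None".toList
  else "None".toList
termination_by cs.length
decreasing_by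
  · exact lt_of_lt_of_le (pvSliceFiveLt _ (Bool.and_elim_right h1)) (pvStripLenLe cs)
  · exact lt_of_lt_of_le (pvSliceTwoLt _ h2) (pvStripLenLe cs)

def example_for_py (py_t : String) : String := String.ofList (exAChars py_t.toList)

-- ===== PORT B =====
def pvNodes : List (List Char × List Char) :=
  [("ListNode".toList, "ListNode(1, ListNode(2))".toList),
   ("TreeNode".toList, "TreeNode(1, TreeNode(2), TreeNode(3))".toList),
   ("UndirectedGraphNode".toList, "UndirectedGraphNode(1)".toList),
   ("RandomListNode".toList, "RandomListNode(1)".toList),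
   ("NestedInteger".toList, "NestedInteger(1)".toList)]

def pvScalars : PySem.Dict (List Char) (List Char) :=
  PySem.Dict.mk
    [("int".toList, "0".toList), ("long".toList, "0".toList),
     ("float".toList, "0.0".toList), ("double".toList, "0.0".toList),
     ("bool".toList, "False".toList),
     ("str".toList, "\"a\"".toList), ("character".toList, "\"a\"".toList),
     ("None".toList, "None".toList)]

def pvPeel (t : List Char) (depth : Nat) : List Char × Nat :=
  if h1 : (PySem.Chars.startswith t "list[".toList && PySem.Chars.endswith t "]".toList) = true then
    pvPeel (PySem.Chars.strip (PySem.Chars.slice t (some 5) (some (-1)))) (depth + 1)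
  else if h2 : PySem.Chars.endswith t "[]".toList = true then
    pvPeel (PySem.Chars.strip (PySem.Chars.slice t none (some (-2)))) (depth + 1)
  else (t, depth)
termination_by t.length
decreasing_by
  · exact lt_of_le_of_lt (pvStripLenLe _) (pvSliceFiveLt _ (Bool.and_elim_right h1))
  · exact lt_of_le_of_lt (pvStripLenLe _) (pvSliceTwoLt _ h2)

def pvBase (t : List Char) : List Char :=
  match pvNodes.find? (fun p => PySem.Chars.isIn p.1 t) with
  | some p => p.2
  | none => pvScalars.getD t "None".toList

def example_for_py_alt (py_t : String) : String :=
  let r := pvPeel (PySem.Chars.strip py_t.toList) 0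
  String.ofList (List.replicate r.2 '[' ++ pvBase r.1 ++ List.replicate r.2 ']')


-- ===== PRECONDITION & SPEC =====
def Spec_example_for_py (py_t : String) (out : String) : Prop := out = example_for_py_alt py_t
instance (py_t : String) (out : String) : Decidable (Spec_example_for_py py_t out) := by unfold Spec_example_for_py; infer_instance

-- ===== CLAIM (what is proved, stated in full; the proofs are below) =====
def Claim_equal_example_for_py : Prop := ∀ (py_t : String), Dom_example_for_py py_t → Spec_example_for_py py_t (example_for_py py_t)

-- ===== LEMMAS AND PROOFS =====
-- equation lemmas
theorem pvPeel_eq1 (t : List Char) (d : Nat)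
    (h1 : (PySem.Chars.startswith t "list[".toList && PySem.Chars.endswith t "]".toList) = true) :
    pvPeel t d = pvPeel (PySem.Chars.strip (PySem.Chars.slice t (some 5) (some (-1)))) (d + 1) := by
  rw [pvPeel]; rw [dif_pos h1]

theorem pvPeel_eq2 (t : List Char) (d : Nat)
    (h1 : (PySem.Chars.startswith t "list[".toList && PySem.Chars.endswith t "]".toList) = false)
    (h2 : PySem.Chars.endswith t "[]".toList = true) :
    pvPeel t d = pvPeel (PySem.Chars.strip (PySem.Chars.slice t none (some (-2)))) (d + 1) := by
  rw [pvPeel]; rw [dif_neg (by rw [h1]; decide), dif_pos h2]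

theorem pvPeel_eq3 (t : List Char) (d : Nat)
    (h1 : (PySem.Chars.startswith t "list[".toList && PySem.Chars.endswith t "]".toList) = false)
    (h2 : PySem.Chars.endswith t "[]".toList = false) :
    pvPeel t d = (t, d) := by
  rw [pvPeel]; rw [dif_neg (by rw [h1]; decide), dif_neg (by rw [h2]; decide)]

theorem exA_eq1 (cs : List Char)
    (h1 : (PySem.Chars.startswith (PySem.Chars.strip cs) "list[".toList && PySem.Chars.endswith (PySem.Chars.strip cs) "]".toList) = true) :
    exAChars cs = '[' :: exAChars (PySem.Chars.slice (PySem.Chars.strip cs) (some 5) (some (-1))) ++ [']'] := by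
  rw [exAChars]; exact dif_pos h1

theorem exA_eq2 (cs : List Char)
    (h1 : (PySem.Chars.startswith (PySem.Chars.strip cs) "list[".toList && PySem.Chars.endswith (PySem.Chars.strip cs) "]".toList) = false)
    (h2 : PySem.Chars.endswith (PySem.Chars.strip cs) "[]".toList = true) :
    exAChars cs = '[' :: exAChars (PySem.Chars.slice (PySem.Chars.strip cs) none (some (-2))) ++ [']'] := by
  rw [exAChars]; exact (dif_neg (by rw [h1]; decide)).trans (dif_pos h2)

theorem pvBase_eq (t : List Char) :
    (if PySem.Chars.isIn "ListNode".toList t then "ListNode(1, ListNode(2))".toList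
     else if PySem.Chars.isIn "TreeNode".toList t then "TreeNode(1, TreeNode(2), TreeNode(3))".toList
     else if PySem.Chars.isIn "UndirectedGraphNode".toList t then "UndirectedGraphNode(1)".toList
     else if PySem.Chars.isIn "RandomListNode".toList t then "RandomListNode(1)".toList
     else if PySem.Chars.isIn "NestedInteger".toList t then "NestedInteger(1)".toList
     else if t = "int".toList ∨ t = "long".toList then "0".toList
     else if t = "float".toList ∨ t = "double".toList then "0.0".toList
     else if t = "bool".toList then "False".toList
     else if t = "str".toList ∨ t = "character".toList then "\"a\"".toList
     else if t = "None".toList then "None".toList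
     else "None".toList) = pvBase t := by
  by_cases c1 : PySem.Chars.isIn "ListNode".toList t = true
  · simp_all [pvBase, pvNodes]
  by_cases c2 : PySem.Chars.isIn "TreeNode".toList t = true
  · simp_all [pvBase, pvNodes]
  by_cases c3 : PySem.Chars.isIn "UndirectedGraphNode".toList t = true
  · simp_all [pvBase, pvNodes]
  by_cases c4 : PySem.Chars.isIn "RandomListNode".toList t = true
  · simp_all [pvBase, pvNodes]
  by_cases c5 : PySem.Chars.isIn "NestedInteger".toList t = true
  · simp_all [pvBase, pvNodes]
  by_cases s1 : t = "int".toList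
  · subst s1; decide
  by_cases s2 : t = "long".toList
  · subst s2; decide
  by_cases s3 : t = "float".toList
  · subst s3; decide
  by_cases s4 : t = "double".toList
  · subst s4; decide
  by_cases s5 : t = "bool".toList
  · subst s5; decide
  by_cases s6 : t = "str".toList
  · subst s6; decide
  by_cases s7 : t = "character".toList
  · subst s7; decide
  by_cases s8 : t = "None".toList
  · subst s8; decide
  have n1 : ("int".toList == t) = false := beq_eq_false_iff_ne.mpr (Ne.symm s1)
  have n2 : ("long".toList == t) = false := beq_eq_false_iff_ne.mpr (Ne.symm s2)
  have n3 : ("float".toList == t) = false := beq_eq_false_iff_ne.mpr (Ne.symm s3)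
  have n4 : ("double".toList == t) = false := beq_eq_false_iff_ne.mpr (Ne.symm s4)
  have n5 : ("bool".toList == t) = false := beq_eq_false_iff_ne.mpr (Ne.symm s5)
  have n6 : ("str".toList == t) = false := beq_eq_false_iff_ne.mpr (Ne.symm s6)
  have n7 : ("character".toList == t) = false := beq_eq_false_iff_ne.mpr (Ne.symm s7)
  have n8 : ("None".toList == t) = false := beq_eq_false_iff_ne.mpr (Ne.symm s8)
  simp_all [pvBase, pvNodes, pvScalars, PySem.Dict.getD_eq_get?_getD, PySem.Dict.get?]

theorem exA_eq3 (cs : List Char)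
    (h1 : (PySem.Chars.startswith (PySem.Chars.strip cs) "list[".toList && PySem.Chars.endswith (PySem.Chars.strip cs) "]".toList) = false)
    (h2 : PySem.Chars.endswith (PySem.Chars.strip cs) "[]".toList = false) :
    exAChars cs = pvBase (PySem.Chars.strip cs) := by
  rw [exAChars]; rw [dif_neg (by rw [h1]; decide), dif_neg (by rw [h2]; decide)]
  exact pvBase_eq _


theorem pvPeel_acc (n : Nat) : ∀ (t : List Char) (d : Nat), t.length ≤ n →
    pvPeel t d = ((pvPeel t 0).1, (pvPeel t 0).2 + d) := by
  induction n with
  | zero =>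
    intro t d h
    have ht : t = [] := List.eq_nil_of_length_eq_zero (Nat.le_zero.mp h)
    subst ht
    rw [pvPeel_eq3 _ _ (by decide) (by decide), pvPeel_eq3 _ _ (by decide) (by decide)]
    simp
  | succ n ih =>
    intro t d h
    by_cases h1 : (PySem.Chars.startswith t "list[".toList && PySem.Chars.endswith t "]".toList) = true
    · have hlt : (PySem.Chars.strip (PySem.Chars.slice t (some 5) (some (-1)))).length ≤ n := by
        have := lt_of_le_of_lt (pvStripLenLe _) (pvSliceFiveLt t (Bool.and_elim_right h1))
        omega
      rw [pvPeel_eq1 t d h1, pvPeel_eq1 t 0 h1, ih _ _ hlt, ih _ 1 hlt]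
      simp [Nat.add_comm, Nat.add_assoc]
    · by_cases h2 : PySem.Chars.endswith t "[]".toList = true
      · have hlt : (PySem.Chars.strip (PySem.Chars.slice t none (some (-2)))).length ≤ n := by
          have := lt_of_le_of_lt (pvStripLenLe _) (pvSliceTwoLt t h2)
          omega
        rw [pvPeel_eq2 t d (by simpa using h1) h2, pvPeel_eq2 t 0 (by simpa using h1) h2,
          ih _ _ hlt, ih _ 1 hlt]
        simp [Nat.add_comm, Nat.add_assoc]
      · rw [pvPeel_eq3 t d (by simpa using h1) (by simpa using h2),
          pvPeel_eq3 t 0 (by simpa using h1) (by simpa using h2)]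
        simp

theorem pvWrapSucc (d : Nat) (b : List Char) :
    '[' :: (List.replicate d '[' ++ b ++ List.replicate d ']') ++ [']']
      = List.replicate (d + 1) '[' ++ b ++ List.replicate (d + 1) ']' := by
  rw [show List.replicate (d + 1) (']' : Char) = List.replicate d ']' ++ [']'] from List.replicate_succ']
  simp [List.replicate_succ]

theorem pvMain (n : Nat) : ∀ (cs : List Char), cs.length ≤ n →
    exAChars cs = List.replicate (pvPeel (PySem.Chars.strip cs) 0).2 '[' ++
      pvBase (pvPeel (PySem.Chars.strip cs) 0).1 ++
      List.replicate (pvPeel (PySem.Chars.strip cs) 0).2 ']' := by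
  induction n with
  | zero =>
    intro cs h
    have ht : cs = [] := List.eq_nil_of_length_eq_zero (Nat.le_zero.mp h)
    subst ht
    rw [exA_eq3 [] (by decide) (by decide), pvPeel_eq3 _ 0 (by decide) (by decide)]
    simp
  | succ n ih =>
    intro cs h
    by_cases h1 : (PySem.Chars.startswith (PySem.Chars.strip cs) "list[".toList &&
        PySem.Chars.endswith (PySem.Chars.strip cs) "]".toList) = true
    · have hlt : (PySem.Chars.slice (PySem.Chars.strip cs) (some 5) (some (-1))).length ≤ n := by
        have h5 := pvSliceFiveLt (PySem.Chars.strip cs) (Bool.and_elim_right h1)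
        have hs1 := pvStripLenLe cs
        omega
      rw [exA_eq1 cs h1, ih _ hlt, pvPeel_eq1 _ 0 h1,
        pvPeel_acc (PySem.Chars.strip (PySem.Chars.slice (PySem.Chars.strip cs) (some 5) (some (-1)))).length _ 1 le_rfl]
      exact pvWrapSucc _ _
    · by_cases h2 : PySem.Chars.endswith (PySem.Chars.strip cs) "[]".toList = true
      · have hlt : (PySem.Chars.slice (PySem.Chars.strip cs) none (some (-2))).length ≤ n := by
          have h5 := pvSliceTwoLt (PySem.Chars.strip cs) h2
          have hs1 := pvStripLenLe cs
          omega
        rw [exA_eq2 cs (by simpa using h1) h2, ih _ hlt,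
          pvPeel_eq2 _ 0 (by simpa using h1) h2,
          pvPeel_acc (PySem.Chars.strip (PySem.Chars.slice (PySem.Chars.strip cs) none (some (-2)))).length _ 1 le_rfl]
        exact pvWrapSucc _ _
      · rw [exA_eq3 cs (by simpa using h1) (by simpa using h2),
          pvPeel_eq3 _ 0 (by simpa using h1) (by simpa using h2)]
        simp

-- ===== VERDICT (by name: the statement is the Claim_ definition above) =====
theorem example_for_py_spec : Claim_equal_example_for_py := by
  intro py_t _
  unfold Spec_example_for_py
  simp only [example_for_py, example_for_py_alt]
  exact congrArg String.ofList (pvMain py_t.toList.length py_t.toList le_rfl)
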